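-- pv_equiv track=rewrite | github.com/ydna985/exercices-inf1007 | ch05_1/exercice.py | verify_ages
-- ===== SOURCE A (Python) =====
-- from typing import List
--
-- def verify_ages(groups: List[List[int]]) -> List[bool]:
--     resultat=[]
--     for group in groups:
--         if len(group) > 10 or len(group) <= 3:
--             resultat.append(False)
--             continue
--         elif 25 in group:
--             resultat.append(True)
--             continue
--         elif (min(group) < 18) or (50 in group and max(group) > 70):
--             resultat.append(False)
--         else:
--             resultat.append(True)
--
--
--     return resultat
-- ===== SOURCE B (Python) =====
-- from typing import List
--
-- # Truth table over the four relevant element properties of a group: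
-- # bit0 = some age < 18, bit1 = some age == 25, bit2 = some age == 50, bit3 = some age > 70.
-- def _build_table():
--     table = []
--     for m in range(16):
--         under = m & 1
--         has25 = m & 2
--         has50 = m & 4
--         over = m & 8
--         table.append(bool(has25) or (not under and not (has50 and over)))
--     return table
--
-- _VERDICT = _build_table()
--
-- def verify_ages(groups: List[List[int]]) -> List[bool]:
--     resultat = []
--     for group in groups:
--         if 3 < len(group) <= 10:
--             m = 0
--             for x in group:
--                 m |= (x < 18) | (x == 25) << 1 | (x == 50) << 2 | (x > 70) << 3
--             resultat.append(_VERDICT[m])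
--         else:
--             resultat.append(False)
--     return resultat
-- ===== Notes on version B (the rewrite author's own statement) =====
-- stated objective: alternative
-- what changed: B abstracts each group to a 4-bit property mask (some<18, has 25, has 50, some>70) accumulated with bitwise OR and decides it by a precomputed 16-entry truth table, eliminating A's min()/max() computations, membership scans and elif chain.
import Mathlib
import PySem

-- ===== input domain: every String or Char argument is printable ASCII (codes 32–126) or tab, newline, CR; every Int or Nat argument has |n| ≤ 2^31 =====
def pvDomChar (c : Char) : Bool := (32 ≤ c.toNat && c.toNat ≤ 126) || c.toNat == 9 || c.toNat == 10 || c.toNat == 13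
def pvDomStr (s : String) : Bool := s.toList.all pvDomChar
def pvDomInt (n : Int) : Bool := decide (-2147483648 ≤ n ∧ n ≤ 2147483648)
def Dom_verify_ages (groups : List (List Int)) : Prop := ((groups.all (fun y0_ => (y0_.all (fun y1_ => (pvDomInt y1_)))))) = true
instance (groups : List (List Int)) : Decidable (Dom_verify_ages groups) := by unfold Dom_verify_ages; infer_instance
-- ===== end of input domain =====

-- B abstracts each group to a 4-bit property mask (some<18, has25, has50, some>70) built by a
-- bitwise-OR pass and decides it by a precomputed 16-entry truth table, replacing A's
-- min()/max()/'in' scans and elif chain; objective: alternative decomposition.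

-- ===== PORT A =====
-- Python min(group)/max(group) for a nonempty list (only called under the length guard).
def pyMinA (xs : List Int) : Int :=
  match xs with
  | [] => 0
  | x :: t => t.foldl min x

def pyMaxA (xs : List Int) : Int :=
  match xs with
  | [] => 0
  | x :: t => t.foldl max x

def verify_ages (groups : List (List Int)) : List Bool :=
  groups.foldl (fun resultat group =>
    if group.length > 10 ∨ group.length ≤ 3 then resultat ++ [false]
    else if group.any (fun y => y == 25) then resultat ++ [true]
    else if pyMinA group < 18 ∨ (group.any (fun y => y == 50) ∧ pyMaxA group > 70) then
      resultat ++ [false]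
    else resultat ++ [true]) []

-- ===== PORT B =====
-- the module-level _VERDICT truth table of Source B
def pvTableB : List Bool :=
  (List.range 16).map (fun m =>
    decide (m &&& 2 ≠ 0) || (!decide (m &&& 1 ≠ 0) && !(decide (m &&& 4 ≠ 0) && decide (m &&& 8 ≠ 0))))

-- the inner 'm |= …' loop of Source B
def maskB (group : List Int) : Nat :=
  group.foldl (fun (m : Nat) (x : Int) =>
    m ||| ((if x < 18 then 1 else 0)
          ||| ((if x == 25 then 1 else 0) <<< 1)
          ||| ((if x == 50 then 1 else 0) <<< 2)
          ||| ((if x > 70 then 1 else 0) <<< 3))) 0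

def verify_ages_alt (groups : List (List Int)) : List Bool :=
  groups.foldl (fun resultat group =>
    if 3 < group.length ∧ group.length ≤ 10 then
      -- _VERDICT[m]: m < 16 always, so the plain-default lookup is exact
      resultat ++ [pvTableB.getD (maskB group) false]
    else resultat ++ [false]) []

-- ===== PRECONDITION & SPEC =====
def Spec_verify_ages (groups : List (List Int)) (out : List Bool) : Prop := out = verify_ages_alt groups
instance (groups : List (List Int)) (out : List Bool) : Decidable (Spec_verify_ages groups out) := by unfold Spec_verify_ages; infer_instance

-- ===== CLAIM (what is proved, stated in full; the proofs are below) =====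
def Claim_equal_verify_ages : Prop := ∀ (groups : List (List Int)), Dom_verify_ages groups → Spec_verify_ages groups (verify_ages groups)

-- ===== LEMMAS AND PROOFS =====

-- A's per-group if-chain as a function.
def judgeA (group : List Int) : Bool :=
  if group.length > 10 ∨ group.length ≤ 3 then false
  else if group.any (fun y => y == 25) then true
  else if pyMinA group < 18 ∨ (group.any (fun y => y == 50) ∧ pyMaxA group > 70) then false
  else true

-- B's per-group computation as a function.
def judgeB (group : List Int) : Bool :=
  if 3 < group.length ∧ group.length ≤ 10 then pvTableB.getD (maskB group) false
  else false

-- bitmask encoding of four boolean properties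
def encB (a b c d : Bool) : Nat :=
  (cond a 1 0) ||| (cond b 2 0) ||| (cond c 4 0) ||| (cond d 8 0)

lemma foldl_append_map (f : List Int → Bool) (l : List (List Int)) (acc : List Bool) :
    l.foldl (fun r g => r ++ [f g]) acc = acc ++ l.map f := by
  induction l generalizing acc with
  | nil => simp
  | cons g t ih => simp [ih]

lemma verify_ages_eq_map (groups : List (List Int)) :
    verify_ages groups = groups.map judgeA := by
  unfold verify_ages
  have hbody : (fun (resultat : List Bool) (group : List Int) =>
      if group.length > 10 ∨ group.length ≤ 3 then resultat ++ [false]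
      else if group.any (fun y => y == 25) then resultat ++ [true]
      else if pyMinA group < 18 ∨ (group.any (fun y => y == 50) ∧ pyMaxA group > 70) then
        resultat ++ [false]
      else resultat ++ [true])
      = (fun r g => r ++ [judgeA g]) := by
    funext r g
    simp only [judgeA]
    split_ifs <;> rfl
  rw [hbody, foldl_append_map]
  simp

lemma alt_eq_map (groups : List (List Int)) :
    verify_ages_alt groups = groups.map judgeB := by
  unfold verify_ages_alt
  have hbody : (fun (resultat : List Bool) (group : List Int) =>
      if 3 < group.length ∧ group.length ≤ 10 then
        resultat ++ [pvTableB.getD (maskB group) false]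
      else resultat ++ [false])
      = (fun r g => r ++ [judgeB g]) := by
    funext r g
    simp only [judgeB]
    split_ifs <;> rfl
  rw [hbody, foldl_append_map]
  simp

lemma enc_or (a b c d a' b' c' d' : Bool) :
    encB (a || a') (b || b') (c || c') (d || d') = encB a b c d ||| encB a' b' c' d' := by
  cases a <;> cases b <;> cases c <;> cases d <;> cases a' <;> cases b' <;> cases c' <;> cases d' <;> decide

lemma elem_mask_eq (x : Int) :
    ((if x < 18 then 1 else 0)
      ||| ((if x == 25 then 1 else 0) <<< 1)
      ||| ((if x == 50 then 1 else 0) <<< 2)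
      ||| ((if x > 70 then 1 else 0) <<< 3) : Nat)
    = encB (decide (x < 18)) (x == 25) (x == 50) (decide (x > 70)) := by
  unfold encB
  by_cases h1 : x < 18 <;> by_cases h2 : (x == 25) = true <;> by_cases h3 : (x == 50) = true <;>
    by_cases h4 : x > 70 <;>
    simp [h1, h2, h3, h4]

lemma mask_fold (t : List Int) (m : Nat) :
    t.foldl (fun (m : Nat) (x : Int) =>
      m ||| ((if x < 18 then 1 else 0)
            ||| ((if x == 25 then 1 else 0) <<< 1)
            ||| ((if x == 50 then 1 else 0) <<< 2)
            ||| ((if x > 70 then 1 else 0) <<< 3))) m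
    = m ||| encB (t.any (fun y => decide (y < 18))) (t.any (fun y => y == 25))
               (t.any (fun y => y == 50)) (t.any (fun y => decide (y > 70))) := by
  induction t generalizing m with
  | nil => simp [encB]
  | cons x t ih =>
    rw [List.foldl_cons, ih, elem_mask_eq]
    simp only [List.any_cons, enc_or]
    rw [Nat.or_assoc]

lemma table_enc (a b c d : Bool) :
    pvTableB.getD (encB a b c d) false = (b || (!a && !(c && d))) := by
  cases a <;> cases b <;> cases c <;> cases d <;> decide

lemma foldl_min_lt (t : List Int) (a : Int) :
    decide (t.foldl min a < 18) = (decide (a < 18) || t.any (fun y => decide (y < 18))) := by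
  induction t generalizing a with
  | nil => simp
  | cons x t ih =>
    have h : decide (min a x < 18) = (decide (a < 18) || decide (x < 18)) := by
      by_cases h1 : a < 18 <;> by_cases h2 : x < 18 <;> simp [h1, h2, min_def] <;> omega
    rw [List.foldl_cons, ih, h, List.any_cons, Bool.or_assoc]

lemma foldl_max_gt (t : List Int) (a : Int) :
    decide (t.foldl max a > 70) = (decide (a > 70) || t.any (fun y => decide (y > 70))) := by
  induction t generalizing a with
  | nil => simp
  | cons x t ih =>
    have h : decide (max a x > 70) = (decide (a > 70) || decide (x > 70)) := by
      by_cases h1 : a > 70 <;> by_cases h2 : x > 70 <;> simp [h1, h2, max_def] <;> omega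
    rw [List.foldl_cons, ih, h, List.any_cons, Bool.or_assoc]

lemma judge_eq (g : List Int) : judgeA g = judgeB g := by
  unfold judgeA judgeB
  by_cases hl : 3 < g.length ∧ g.length ≤ 10
  · obtain ⟨x, t, rfl⟩ : ∃ x t, g = x :: t := by
      cases g with
      | nil => simp at hl
      | cons a b => exact ⟨a, b, rfl⟩
    rw [if_neg (by omega : ¬((x :: t).length > 10 ∨ (x :: t).length ≤ 3)), if_pos hl]
    have hA : ((x :: t).any (fun y => decide (y < 18))) = decide (pyMinA (x :: t) < 18) := by
      rw [List.any_cons]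
      simp only [pyMinA]
      exact (foldl_min_lt t x).symm
    have hD : ((x :: t).any (fun y => decide (y > 70))) = decide (pyMaxA (x :: t) > 70) := by
      rw [List.any_cons]
      simp only [pyMaxA]
      exact (foldl_max_gt t x).symm
    have hmask : maskB (x :: t)
        = encB (decide (pyMinA (x :: t) < 18)) ((x :: t).any (fun y => y == 25))
               ((x :: t).any (fun y => y == 50)) (decide (pyMaxA (x :: t) > 70)) := by
      unfold maskB
      rw [mask_fold, Nat.zero_or, hA, hD]
    rw [hmask, table_enc]
    by_cases hB : ((x :: t).any (fun y => y == 25)) = true <;>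
      by_cases hC : ((x :: t).any (fun y => y == 50)) = true <;>
      by_cases hm : pyMinA (x :: t) < 18 <;>
      by_cases hM : pyMaxA (x :: t) > 70 <;>
      simp [hB, hC, hm, hM]
  · rw [if_pos (by omega), if_neg hl]

-- ===== VERDICT (by name: the statement is the Claim_ definition above) =====
theorem verify_ages_spec : Claim_equal_verify_ages := by
  intro groups _
  show verify_ages groups = verify_ages_alt groups
  rw [verify_ages_eq_map, alt_eq_map]
  exact List.map_congr_left (fun g _ => judge_eq g)
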